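-- pv_equiv track=rewrite | github.com/jsharbrough/allopolyploidCytonuclearEvolutionaryRate | scripts/subTreeIterator.py | checkLeaves
-- ===== SOURCE A (Python) =====
-- def checkLeaves(leaves,speciesIDList):
--     speciesLeafDict = {}
--     for speciesID in speciesIDList:
--         speciesLeafDict[speciesID] = 0
--     for leaf in leaves:
--         currSpecies = False
--         for speciesID in speciesIDList:
--             if speciesID in leaf:
--                 currSpecies = speciesID
--                 break
--         if currSpecies != False:
--             speciesLeafDict[currSpecies] += 1
--     numSpecies = 0
--     for species in speciesIDList:
--         if speciesLeafDict[species] > 0: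
--             numSpecies += 1
--     return speciesLeafDict,numSpecies
-- ===== SOURCE B (Python) =====
-- def checkLeaves(leaves, speciesIDList):
--     counts = {}
--     remaining = leaves
--     for s in speciesIDList:
--         if s in counts:
--             continue
--         counts[s] = sum(1 for l in remaining if s in l)
--         remaining = [l for l in remaining if s not in l]
--     numSpecies = sum(1 for s in speciesIDList if counts[s] > 0)
--     return counts, numSpecies
-- ===== Notes on version B (the rewrite author's own statement) =====
-- stated objective: alternative
-- what changed: B replaces A's per-leaf scan over the species list (first-match wins, counted into a pre-zeroed dict) by a species-outer sieve: each distinct species is processed once, counting its matches among the still-unclaimed leaves and removing them, so no per-leaf inner break loop remains.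
import Mathlib
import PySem

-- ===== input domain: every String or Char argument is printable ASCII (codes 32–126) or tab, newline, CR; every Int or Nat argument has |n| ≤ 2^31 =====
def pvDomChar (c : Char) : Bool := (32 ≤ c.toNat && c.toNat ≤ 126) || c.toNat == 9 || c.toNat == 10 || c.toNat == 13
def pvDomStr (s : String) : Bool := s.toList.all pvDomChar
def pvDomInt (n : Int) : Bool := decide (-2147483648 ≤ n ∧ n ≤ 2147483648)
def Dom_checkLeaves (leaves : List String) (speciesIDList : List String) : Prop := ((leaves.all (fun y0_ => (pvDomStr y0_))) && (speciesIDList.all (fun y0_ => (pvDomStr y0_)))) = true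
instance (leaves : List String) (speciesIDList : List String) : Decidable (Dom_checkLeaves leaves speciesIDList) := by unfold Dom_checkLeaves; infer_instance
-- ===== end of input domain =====

-- B replaces A's per-leaf first-match scan by a species-outer sieve over the still-unclaimed
-- leaves (objective: alternative decomposition, same worst-case cost).

-- ===== PORT A =====
-- inner 'for speciesID in speciesIDList: if speciesID in leaf: currSpecies = speciesID; break'
def firstMatch : List String → String → Option String
  | [], _ => none
  | s :: rest, leaf => if PySem.Str.isIn s leaf then some s else firstMatch rest leaf

def checkLeaves (leaves : List String) (speciesIDList : List String) : (List (String × Int)) × Int :=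
  let d0 : PySem.Dict String Int :=
    speciesIDList.foldl (fun d s => d.insert s 0) PySem.Dict.empty
  let d1 : PySem.Dict String Int :=
    leaves.foldl (fun d leaf =>
      match firstMatch speciesIDList leaf with
      | some s => d.modify s 0 (· + 1)   -- 'speciesLeafDict[currSpecies] += 1'; the key is always present here, so modify is exact
      | none => d) d0
  let numSpecies : Int :=
    speciesIDList.foldl (fun n s => if d1.getD s 0 > 0 then n + 1 else n) 0
  (d1.items, numSpecies)

-- ===== PORT B =====
-- 'for s in speciesIDList: if s in counts: continue; counts[s] = sum(...); remaining = [...]'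
def sieveLoop : List String → PySem.Dict String Int → List String → PySem.Dict String Int
  | [], counts, _ => counts
  | s :: rest, counts, remaining =>
    if counts.contains s then sieveLoop rest counts remaining
    else sieveLoop rest
      (counts.insert s ((remaining.filter (fun l => PySem.Str.isIn s l)).length : Int))
      (remaining.filter (fun l => !PySem.Str.isIn s l))

def checkLeaves_alt (leaves : List String) (speciesIDList : List String) : (List (String × Int)) × Int :=
  let counts := sieveLoop speciesIDList PySem.Dict.empty leaves
  let numSpecies : Int :=
    ((speciesIDList.filter (fun s => decide (counts.getD s 0 > 0))).length : Int)
  (counts.items, numSpecies)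

-- ===== PRECONDITION & SPEC =====
def Spec_checkLeaves (leaves : List String) (speciesIDList : List String) (out : (List (String × Int)) × Int) : Prop := out = checkLeaves_alt leaves speciesIDList
instance (leaves : List String) (speciesIDList : List String) (out : (List (String × Int)) × Int) : Decidable (Spec_checkLeaves leaves speciesIDList out) := by unfold Spec_checkLeaves; infer_instance

-- ===== CLAIM (what is proved, stated in full; the proofs are below) =====
def Claim_equal_checkLeaves : Prop := ∀ (leaves : List String) (speciesIDList : List String), Dom_checkLeaves leaves speciesIDList → Spec_checkLeaves leaves speciesIDList (checkLeaves leaves speciesIDList)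

-- ===== LEMMAS AND PROOFS =====

-- canonical form of the dictionary: keys in first-occurrence order, each key paired with
-- the number of (still-unclaimed) leaves it matches
def canonD : List String → List String → List (String × Int)
  | [], _ => []
  | s :: rest, leaves =>
    (s, ((leaves.filter (fun l => PySem.Str.isIn s l)).length : Int)) ::
      canonD (rest.filter (fun t => t != s)) (leaves.filter (fun l => !PySem.Str.isIn s l))
  termination_by ids _ => ids.length
  decreasing_by simpa using Nat.lt_succ_of_le (List.length_filter_le _ _)

-- number of leaves whose first matching species is s
def cntFM (ids leaves : List String) (s : String) : Int :=
  ((leaves.filter (fun l => firstMatch ids l == some s)).length : Int)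

theorem fm_isIn {ids : List String} {l s : String}
    (h : firstMatch ids l = some s) : PySem.Str.isIn s l = true := by
  induction ids with
  | nil => simp [firstMatch] at h
  | cons t rest ih =>
    simp only [firstMatch] at h
    split at h
    · next hc => injection h with h'; subst h'; exact hc
    · exact ih h

theorem fm_mem {ids : List String} {l s : String}
    (h : firstMatch ids l = some s) : s ∈ ids := by
  induction ids with
  | nil => simp [firstMatch] at h
  | cons t rest ih =>
    simp only [firstMatch] at h
    split at h
    · injection h with h'; subst h'; exact List.mem_cons_self
    · exact List.mem_cons_of_mem _ (ih h)

theorem fm_filter_ne {rest : List String} {l s : String}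
    (h : PySem.Str.isIn s l = false) :
    firstMatch (rest.filter (fun t => t != s)) l = firstMatch rest l := by
  induction rest with
  | nil => rfl
  | cons t rest ih =>
    by_cases hts : t = s
    · subst hts
      have hf : (t :: rest).filter (fun u => u != t) = rest.filter (fun u => u != t) := by simp
      rw [hf, ih]
      rw [PySem.Str.isIn_eq] at h
      simp only [firstMatch]
      rw [if_neg (by simp [h])]
    · have hf : (t :: rest).filter (fun u => u != s) = t :: rest.filter (fun u => u != s) := by
        simp [hts]
      rw [hf]
      simp only [firstMatch, ih]

theorem fm_cons_self_iff (s : String) (rest : List String) (l : String) :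
    (firstMatch (s :: rest) l == some s) = PySem.Str.isIn s l := by
  simp only [firstMatch]
  by_cases h : PySem.Str.isIn s l
  · rw [if_pos h, h]; simp
  · rw [Bool.not_eq_true, PySem.Str.isIn_eq] at h
    rw [if_neg (by simp [h]), PySem.Str.isIn_eq, h]
    rw [beq_eq_false_iff_ne]
    intro hc; have := fm_isIn hc; rw [PySem.Str.isIn_eq] at this; rw [this] at h; cases h

theorem fm_cons_ne (s : String) (rest : List String) (l t : String) (hts : t ≠ s) :
    (firstMatch (s :: rest) l == some t)
      = (!PySem.Str.isIn s l && (firstMatch (rest.filter (fun u => u != s)) l == some t)) := by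
  simp only [firstMatch]
  by_cases h : PySem.Str.isIn s l
  · rw [if_pos h, h]; simp [Ne.symm hts]
  · rw [Bool.not_eq_true] at h
    rw [fm_filter_ne h]
    rw [PySem.Str.isIn_eq] at h
    rw [if_neg (by simp [h]), PySem.Str.isIn_eq, h]
    simp

theorem mem_canonD_fst' : ∀ (n : Nat) (ids : List String), ids.length = n →
    ∀ (leaves : List String) (p : String × Int), p ∈ canonD ids leaves → p.1 ∈ ids := by
  intro n
  induction n using Nat.strong_induction_on with
  | _ n ihn =>
  intro ids hn leaves p hp
  cases ids with
  | nil => simp [canonD] at hp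
  | cons s rest =>
    rw [canonD] at hp
    rcases List.mem_cons.mp hp with hp | hp
    · rw [hp]; exact List.mem_cons_self
    · have hlt : (rest.filter (fun t => t != s)).length < n := by
        subst hn; simpa using Nat.lt_succ_of_le (List.length_filter_le _ _)
      have := ihn _ hlt _ rfl _ _ hp
      exact List.mem_cons_of_mem _ (List.mem_of_mem_filter this)

theorem mem_canonD_fst {ids leaves : List String} {p : String × Int}
    (hp : p ∈ canonD ids leaves) : p.1 ∈ ids :=
  mem_canonD_fst' ids.length ids rfl leaves p hp

theorem canonD_keys_nodup' : ∀ (n : Nat) (ids : List String), ids.length = n →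
    ∀ (leaves : List String), ((canonD ids leaves).map Prod.fst).Nodup := by
  intro n
  induction n using Nat.strong_induction_on with
  | _ n ihn =>
  intro ids hn leaves
  cases ids with
  | nil => simp [canonD]
  | cons s rest =>
    have hlt : (rest.filter (fun t => t != s)).length < n := by
      subst hn; simpa using Nat.lt_succ_of_le (List.length_filter_le _ _)
    rw [canonD, List.map_cons, List.nodup_cons]
    refine ⟨?_, ihn _ hlt _ rfl _⟩
    intro hmem
    rcases List.mem_map.mp hmem with ⟨q, hq, hqs⟩
    have hq1 := mem_canonD_fst hq
    have := List.of_mem_filter hq1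
    rw [hqs] at this
    simp at this

theorem canonD_keys_nodup (ids leaves : List String) :
    ((canonD ids leaves).map Prod.fst).Nodup :=
  canonD_keys_nodup' ids.length ids rfl leaves

theorem mem_canonD_keys' : ∀ (n : Nat) (ids : List String), ids.length = n →
    ∀ (leaves : List String) (s : String), s ∈ ids → s ∈ (canonD ids leaves).map Prod.fst := by
  intro n
  induction n using Nat.strong_induction_on with
  | _ n ihn =>
  intro ids hn leaves s hs
  cases ids with
  | nil => simp at hs
  | cons t rest =>
    rw [canonD]
    by_cases hst : s = t
    · rw [hst]; simp
    · rcases hs with _ | hs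
      · exact absurd rfl hst
      next hs =>
      have hlt : (rest.filter (fun u => u != t)).length < n := by
        subst hn; simpa using Nat.lt_succ_of_le (List.length_filter_le _ _)
      have hmem : s ∈ rest.filter (fun u => u != t) := by
        refine List.mem_filter.mpr ⟨hs, ?_⟩; simp [hst]
      have := ihn _ hlt _ rfl (leaves.filter (fun l => !PySem.Str.isIn t l)) s hmem
      rw [List.map_cons]
      exact List.mem_cons_of_mem _ this

theorem mem_canonD_keys {ids : List String} (leaves : List String) {s : String}
    (h : s ∈ ids) : s ∈ (canonD ids leaves).map Prod.fst :=
  mem_canonD_keys' ids.length ids rfl leaves s h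

theorem cntFM_cons_ne {s t : String} (hts : t ≠ s) (rest leaves : List String) :
    cntFM (s :: rest) leaves t
      = cntFM (rest.filter (fun u => u != s)) (leaves.filter (fun l => !PySem.Str.isIn s l)) t := by
  unfold cntFM
  congr 2
  rw [List.filter_filter]
  apply List.filter_congr
  intro l _
  rw [fm_cons_ne s rest l t hts, Bool.and_comm]

theorem cntFM_cons (ids ls : List String) (l : String) (t : String) :
    cntFM ids (l :: ls) t
      = cntFM ids ls t + (if firstMatch ids l == some t then 1 else 0) := by
  unfold cntFM
  rw [List.filter_cons]
  split
  · push_cast [List.length_cons]; ring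
  · simp

theorem canonD_eq_map' : ∀ (n : Nat) (ids : List String), ids.length = n →
    ∀ (leaves : List String),
    canonD ids leaves
      = (canonD ids []).map (fun p => (p.1, p.2 + cntFM ids leaves p.1)) := by
  intro n
  induction n using Nat.strong_induction_on with
  | _ n ihn =>
  intro ids hn leaves
  cases ids with
  | nil => simp [canonD]
  | cons s rest =>
    have hlt : (rest.filter (fun t => t != s)).length < n := by
      subst hn; simpa using Nat.lt_succ_of_le (List.length_filter_le _ _)
    rw [canonD, canonD]
    simp only [List.filter_nil, List.map_cons]
    refine List.cons_eq_cons.mpr ⟨?_, ?_⟩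
    · refine Prod.ext rfl ?_
      simp only [List.length_nil, Nat.cast_zero, zero_add]
      unfold cntFM
      congr 2
      apply List.filter_congr
      intro l _
      exact (fm_cons_self_iff s rest l).symm
    · rw [ihn _ hlt _ rfl (leaves.filter (fun l => !PySem.Str.isIn s l))]
      apply List.map_congr_left
      intro p hp
      have hpf := mem_canonD_fst hp
      have hps : p.1 ≠ s := by
        have := List.of_mem_filter hpf; simpa using this
      refine Prod.ext rfl ?_
      simp only []
      rw [cntFM_cons_ne hps rest leaves]

theorem canonD_eq_map (ids leaves : List String) :
    canonD ids leaves
      = (canonD ids []).map (fun p => (p.1, p.2 + cntFM ids leaves p.1)) :=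
  canonD_eq_map' ids.length ids rfl leaves

theorem init_items : ∀ (ids : List String) (d : PySem.Dict String Int),
    (∀ p ∈ d.items, p.2 = (0 : Int)) →
    (ids.foldl (fun d s => d.insert s 0) d).items
      = d.items ++ canonD (ids.filter (fun t => !d.contains t)) [] := by
  intro ids
  induction ids with
  | nil => intro d _; simp [canonD]
  | cons s rest ih =>
    intro d h0
    rw [List.foldl_cons]
    by_cases hc : d.contains s = true
    · have hins : d.insert s 0 = d := by
        apply PySem.Dict.ext
        rw [PySem.Dict.items_insert_of_contains d 0 hc]
        have : ∀ p ∈ d.items, (if (p.1 == s) = true then ((s, (0:Int))) else p) = p := by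
          intro p hp
          split
          · next hps => rw [← (beq_iff_eq).mp hps, ← h0 p hp]
          · rfl
        rw [List.map_congr_left this]
        simp
      rw [hins, ih d h0, List.filter_cons]
      simp [hc]
    · rw [Bool.not_eq_true] at hc
      have hitems : (d.insert s 0).items = d.items ++ [(s, (0:Int))] :=
        PySem.Dict.items_insert_of_not_contains d 0 hc
      have h0' : ∀ p ∈ (d.insert s 0).items, p.2 = (0 : Int) := by
        rw [hitems]; intro p hp
        rcases List.mem_append.mp hp with hp | hp
        · exact h0 p hp
        · simp at hp; rw [hp]
      rw [ih _ h0', hitems, List.filter_cons]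
      have hfs : (!d.contains s) = true := by rw [hc]; rfl
      rw [if_pos hfs, canonD]
      have hrest : rest.filter (fun t => !(d.insert s 0).contains t)
          = (rest.filter (fun t => !d.contains t)).filter (fun t => t != s) := by
        rw [List.filter_filter]
        apply List.filter_congr
        intro t _
        rw [PySem.Dict.contains_insert]
        simp [Bool.not_or, bne]
      rw [hrest]
      simp

theorem modify_items (d : PySem.Dict String Int) (k : String)
    (hnd : d.keys.Nodup) (hc : d.contains k = true) :
    (d.modify k 0 (· + 1)).items
      = d.items.map (fun p => if p.1 == k then (p.1, p.2 + 1) else p) := by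
  have hk : (d.modify k 0 (· + 1)).keys = d.keys := by
    rw [PySem.Dict.keys_modify]
    exact PySem.Dict.keys_insert_of_contains _ _ hc
  have hnd' : (d.modify k 0 (· + 1)).keys.Nodup := by rw [hk]; exact hnd
  rw [PySem.Dict.items_eq_map_keys _ hnd' 0, hk,
      PySem.Dict.items_eq_map_keys d hnd 0, List.map_map]
  apply List.map_congr_left
  intro a _
  by_cases hak : a = k
  · subst hak
    simp [PySem.Dict.getD_modify_self]
  · have h1 := PySem.Dict.getD_modify_of_ne d (k := k) (k' := a) 0 (· + 1) hak
    simp only [Function.comp]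
    rw [h1]
    have : (a == k) = false := beq_eq_false_iff_ne.mpr hak
    simp [this]

theorem leaf_fold_items (ids : List String) : ∀ (leaves : List String)
    (d : PySem.Dict String Int), d.keys.Nodup →
    (∀ s ∈ ids, d.contains s = true) →
    (leaves.foldl (fun d leaf =>
        match firstMatch ids leaf with
        | some s => d.modify s 0 (· + 1)
        | none => d) d).items
      = d.items.map (fun p => (p.1, p.2 + cntFM ids leaves p.1)) := by
  intro leaves
  induction leaves with
  | nil =>
    intro d _ _
    simp [cntFM]
  | cons l ls ih =>
    intro d hnd hcon
    rw [List.foldl_cons]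
    cases hfm : firstMatch ids l with
    | none =>
      simp only [hfm]
      rw [ih d hnd hcon]
      apply List.map_congr_left
      intro p _
      rw [cntFM_cons]
      simp [hfm]
    | some s =>
      simp only [hfm]
      have hcs : d.contains s = true := hcon s (fm_mem hfm)
      have hk : (d.modify s 0 (· + 1)).keys = d.keys := by
        rw [PySem.Dict.keys_modify]
        exact PySem.Dict.keys_insert_of_contains _ _ hcs
      have hnd' : (d.modify s 0 (· + 1)).keys.Nodup := by rw [hk]; exact hnd
      have hcon' : ∀ t ∈ ids, (d.modify s 0 (· + 1)).contains t = true := by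
        intro t ht
        rw [PySem.Dict.contains_modify]
        rw [hcon t ht]
        simp
      rw [ih _ hnd' hcon', modify_items d s hnd hcs, List.map_map]
      apply List.map_congr_left
      intro p _
      simp only [Function.comp]
      by_cases hps : p.1 = s
      · have hb : (p.1 == s) = true := beq_iff_eq.mpr hps
        rw [if_pos hb]
        refine Prod.ext rfl ?_
        simp only []
        rw [cntFM_cons]
        have : (firstMatch ids l == some p.1) = true := by
          rw [hfm, hps]; simp
        rw [if_pos this]
        ring
      · have hb : (p.1 == s) = false := beq_eq_false_iff_ne.mpr hps
        rw [if_neg (by simp [hb])]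
        refine Prod.ext rfl ?_
        simp only []
        rw [cntFM_cons]
        have : (firstMatch ids l == some p.1) = false := by
          rw [hfm]; simpa using fun h => hps h.symm
        rw [this]
        simp

theorem sieve_items : ∀ (ids : List String) (counts : PySem.Dict String Int)
    (rem : List String),
    (sieveLoop ids counts rem).items
      = counts.items ++ canonD (ids.filter (fun t => !counts.contains t)) rem := by
  intro ids
  induction ids with
  | nil => intro counts rem; simp [sieveLoop, canonD]
  | cons s rest ih =>
    intro counts rem
    rw [sieveLoop]
    by_cases hc : counts.contains s = true
    · rw [if_pos hc, ih, List.filter_cons]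
      simp [hc]
    · rw [Bool.not_eq_true] at hc
      rw [if_neg (by simp [hc]), ih, List.filter_cons]
      have hfs : (!counts.contains s) = true := by rw [hc]; rfl
      rw [if_pos hfs, canonD,
          PySem.Dict.items_insert_of_not_contains _ _ hc]
      have hrest : rest.filter (fun t =>
            !(counts.insert s ((rem.filter (fun l => PySem.Str.isIn s l)).length : Int)).contains t)
          = (rest.filter (fun t => !counts.contains t)).filter (fun t => t != s) := by
        rw [List.filter_filter]
        apply List.filter_congr
        intro t _
        rw [PySem.Dict.contains_insert]
        simp [Bool.not_or, bne]
      rw [hrest]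
      simp

theorem checkLeaves_dicts_eq (leaves ids : List String) :
    (leaves.foldl (fun d leaf =>
        match firstMatch ids leaf with
        | some s => d.modify s 0 (· + 1)
        | none => d)
      (ids.foldl (fun d s => d.insert s 0) (PySem.Dict.empty : PySem.Dict String Int)))
      = sieveLoop ids PySem.Dict.empty leaves := by
  apply PySem.Dict.ext
  have hfilter : ids.filter (fun t => !(PySem.Dict.empty : PySem.Dict String Int).contains t) = ids := by
    apply List.filter_eq_self.mpr
    intro t _
    rw [PySem.Dict.contains_empty]; rfl
  have hd0 : (ids.foldl (fun d s => d.insert s 0) (PySem.Dict.empty : PySem.Dict String Int)).items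
      = canonD ids [] := by
    rw [init_items ids PySem.Dict.empty (by intro p hp; simp [PySem.Dict.empty] at hp), hfilter]
    simp [PySem.Dict.empty]
  have hkeys : (ids.foldl (fun d s => d.insert s 0) (PySem.Dict.empty : PySem.Dict String Int)).keys
      = (canonD ids []).map Prod.fst := by
    rw [PySem.Dict.keys, hd0]
  have hnd : (ids.foldl (fun d s => d.insert s 0) (PySem.Dict.empty : PySem.Dict String Int)).keys.Nodup := by
    rw [hkeys]; exact canonD_keys_nodup ids []
  have hcon : ∀ s ∈ ids,
      (ids.foldl (fun d s => d.insert s 0) (PySem.Dict.empty : PySem.Dict String Int)).contains s = true := by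
    intro s hs
    rw [PySem.Dict.contains_iff_mem_keys, hkeys]
    exact mem_canonD_keys [] hs
  rw [leaf_fold_items ids leaves _ hnd hcon, hd0, ← canonD_eq_map,
      sieve_items ids PySem.Dict.empty leaves, hfilter]
  simp [PySem.Dict.empty]

-- ===== VERDICT (by name: the statement is the Claim_ definition above) =====
theorem checkLeaves_spec : Claim_equal_checkLeaves := by
  intro leaves ids _
  unfold Spec_checkLeaves checkLeaves checkLeaves_alt
  simp only []
  rw [checkLeaves_dicts_eq leaves ids]
  refine Prod.ext rfl ?_
  simp only []
  rw [PySem.List.foldl_ite_add_one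
    (p := fun s => (sieveLoop ids PySem.Dict.empty leaves).getD s 0 > 0)]
  rw [List.countP_eq_length_filter]
  simp
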